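-- pv_equiv track=rewrite | github.com/Jerempire/gym-anything | benchmarks/cua_world/environments/talon_env/tasks/implement_code_review_macros/verifier.py | _count_multistep_commands
-- ===== SOURCE A (Python) =====
-- def _count_multistep_commands(talon_text):
--     """Count commands that have multi-line bodies (indented continuation lines)."""
--     lines = talon_text.splitlines()
--     in_body = False
--     commands = 0
--     current_cmd_multiline = False
--     for i, line in enumerate(lines):
--         stripped = line.strip()
--         if stripped == '-':
--             in_body = True
--             continue
--         if not in_body:
--             continue
--         if stripped.startswith('#') or not stripped:
--             continue
--         # Top-level line (command trigger)
--         if not line.startswith((' ', '\t')):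
--             if current_cmd_multiline:
--                 commands += 1
--             current_cmd_multiline = False
--             # Check if next non-empty line is indented (multi-step command body)
--             for j in range(i + 1, min(i + 10, len(lines))):
--                 next_line = lines[j]
--                 if next_line.strip():
--                     if next_line.startswith((' ', '\t')):
--                         current_cmd_multiline = True
--                     break
--         # Also count any top-level command (single or multi-line)
--     # Handle last command
--     if current_cmd_multiline:
--         commands += 1
--     return commands
-- ===== SOURCE B (Python) =====
-- def _count_multistep_commands(talon_text):
--     """Count commands that have multi-line bodies (indented continuation lines)."""
--     lines = talon_text.splitlines()
--     in_body = False
--     count = 0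
--     pending = None  # index of the last trigger still awaiting its next non-empty line
--     for i, line in enumerate(lines):
--         stripped = line.strip()
--         if pending is not None and stripped:
--             if i - pending < 10 and line.startswith((' ', '\t')):
--                 count += 1
--             pending = None
--         if stripped == '-':
--             in_body = True
--             continue
--         if not in_body:
--             continue
--         if stripped.startswith('#') or not stripped:
--             continue
--         if not line.startswith((' ', '\t')):
--             pending = i
--     return count
-- ===== Notes on version B (the rewrite author's own statement) =====
-- stated objective: simpler
-- what changed: Replaced A's nested bounded lookahead (rescan of up to 9 following lines at every trigger, plus an end-of-loop fix-up) by a single forward pass that remembers the index of the last unresolved trigger and resolves it at the next non-empty line, counting iff that line is indented and within 10 lines of the trigger.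
import Mathlib
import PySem

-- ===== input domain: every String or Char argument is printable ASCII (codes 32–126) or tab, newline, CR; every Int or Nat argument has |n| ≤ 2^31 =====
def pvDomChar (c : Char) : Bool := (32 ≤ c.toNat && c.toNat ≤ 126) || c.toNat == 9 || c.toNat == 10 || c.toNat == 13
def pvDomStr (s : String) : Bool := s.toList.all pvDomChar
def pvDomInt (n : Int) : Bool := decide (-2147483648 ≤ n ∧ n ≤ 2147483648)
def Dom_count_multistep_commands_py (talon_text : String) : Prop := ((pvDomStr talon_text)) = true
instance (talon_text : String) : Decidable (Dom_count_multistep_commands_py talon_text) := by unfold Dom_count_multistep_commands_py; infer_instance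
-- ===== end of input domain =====

-- B replaces A's nested bounded lookahead by a single look-behind pass with a 'pending trigger' state (simpler: no inner loop, no final fix-up).

-- ===== PORT A =====
-- inner loop 'for j in range(i+1, min(i+10, len(lines))): …' with early break on the first
-- non-empty line. lines[j] is ported as pyGetD lines j "" — exact here since every j produced
-- by the range is in bounds.
def pvLookA (lines : List String) : List Int → Bool
  | [] => false
  | j :: rest =>
    if PySem.Str.strip (PySem.List.pyGetD lines j "") ≠ "" then
      PySem.Str.startswith (PySem.List.pyGetD lines j "") " " ||
      PySem.Str.startswith (PySem.List.pyGetD lines j "") "\t"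
    else pvLookA lines rest

-- loop body; state = (in_body, commands, current_cmd_multiline)
def pvStepA (lines : List String) (st : Bool × Int × Bool) (q : Int × String) : Bool × Int × Bool :=
  if PySem.Str.strip q.2 = "-" then (true, st.2.1, st.2.2)
  else if st.1 = false then st
  else if PySem.Str.startswith (PySem.Str.strip q.2) "#" = true ∨ PySem.Str.strip q.2 = "" then st
  else if ¬ (PySem.Str.startswith q.2 " " = true ∨ PySem.Str.startswith q.2 "\t" = true) then
    (st.1, (if st.2.2 then st.2.1 + 1 else st.2.1),
     pvLookA lines (PySem.List.pyRange (q.1 + 1) (min (q.1 + 10) (lines.length : Int)) 1))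
  else st

def count_multistep_commands_py (talon_text : String) : Int :=
  let lines := PySem.Str.splitlines talon_text
  let st := (PySem.List.enumerate lines 0).foldl (pvStepA lines) (false, 0, false)
  if st.2.2 then st.2.1 + 1 else st.2.1

-- ===== PORT B =====
-- loop body; state = (in_body, count, pending); the 'pending is not None and stripped'
-- resolution block runs first, exactly as in Source B.
def pvStepB (st : Bool × Int × Option Int) (q : Int × String) : Bool × Int × Option Int :=
  let resolved : Int × Option Int :=
    match st.2.2 with
    | none => (st.2.1, none)
    | some t =>
      if PySem.Str.strip q.2 ≠ "" then
        (if q.1 - t < 10 ∧ (PySem.Str.startswith q.2 " " = true ∨ PySem.Str.startswith q.2 "\t" = true)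
         then st.2.1 + 1 else st.2.1, none)
      else (st.2.1, some t)
  if PySem.Str.strip q.2 = "-" then (true, resolved.1, resolved.2)
  else if st.1 = false then (st.1, resolved.1, resolved.2)
  else if PySem.Str.startswith (PySem.Str.strip q.2) "#" = true ∨ PySem.Str.strip q.2 = "" then
    (st.1, resolved.1, resolved.2)
  else if ¬ (PySem.Str.startswith q.2 " " = true ∨ PySem.Str.startswith q.2 "\t" = true) then
    (st.1, resolved.1, some q.1)
  else (st.1, resolved.1, resolved.2)

def count_multistep_commands_py_alt (talon_text : String) : Int :=
  let lines := PySem.Str.splitlines talon_text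
  ((PySem.List.enumerate lines 0).foldl pvStepB (false, 0, none)).2.1

-- ===== PRECONDITION & SPEC =====
def Spec_count_multistep_commands_py (talon_text : String) (out : Int) : Prop := out = count_multistep_commands_py_alt talon_text
instance (talon_text : String) (out : Int) : Decidable (Spec_count_multistep_commands_py talon_text out) := by unfold Spec_count_multistep_commands_py; infer_instance

-- ===== CLAIM (what is proved, stated in full; the proofs are below) =====
def Claim_equal_count_multistep_commands_py : Prop := ∀ (talon_text : String), Dom_count_multistep_commands_py talon_text → Spec_count_multistep_commands_py talon_text (count_multistep_commands_py talon_text)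

-- ===== LEMMAS AND PROOFS =====

-- A's lookahead value for a trigger at index t (what pvStepA stores in the flag).
def pvL (lines : List String) (t : Int) : Bool :=
  pvLookA lines (PySem.List.pyRange (t + 1) (min (t + 10) (lines.length : Int)) 1)

-- Loop invariant relating A's state (count c, flag m) and B's state (count c', pending p)
-- after both loops have consumed the first k lines.
def pvInv (lines : List String) (k : Nat) (c : Int) (m : Bool) (c' : Int) (p : Option Int) : Prop :=
  match p with
  | none => c' = c + (if m then 1 else 0)
  | some t => t < (k : Int) ∧ c' = c ∧ m = pvL lines t ∧
      ∀ j : Int, t < j → j < (k : Int) → PySem.Str.strip (PySem.List.pyGetD lines j "") = ""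

lemma pvLookA_all_empty (lines : List String) :
    ∀ r : List Int, (∀ j ∈ r, PySem.Str.strip (PySem.List.pyGetD lines j "") = "") →
      pvLookA lines r = false := by
  intro r
  induction r with
  | nil => intro _; rfl
  | cons j rest ih =>
    intro h
    rw [pvLookA, if_neg (by simp [h j (List.mem_cons_self)]),
        ih (fun j hj => h j (List.mem_cons_of_mem _ hj))]

lemma pvLookA_first_nonempty (lines : List String) (k : Int)
    (hne : PySem.Str.strip (PySem.List.pyGetD lines k "") ≠ "")
    (a b : Int) (hak : a ≤ k)
    (hemp : ∀ j : Int, a ≤ j → j < k → PySem.Str.strip (PySem.List.pyGetD lines j "") = "") :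
      pvLookA lines (PySem.List.pyRange a b 1) =
        (if k < b then
           (PySem.Str.startswith (PySem.List.pyGetD lines k "") " " ||
            PySem.Str.startswith (PySem.List.pyGetD lines k "") "\t")
         else false) := by
  by_cases hab : b ≤ a
  · rw [PySem.List.pyRange_one_eq_nil hab, if_neg (by omega)]
    rfl
  · push_neg at hab
    rw [PySem.List.pyRange_one_cons hab, pvLookA]
    by_cases hek : a = k
    · subst hek
      rw [if_pos hne, if_pos hab]
    · have hak' : a < k := lt_of_le_of_ne hak hek
      rw [if_neg (by simp [hemp a le_rfl hak'])]
      exact pvLookA_first_nonempty lines k hne (a + 1) b (by omega)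
        (fun j hj1 hj2 => hemp j (by omega) hj2)
termination_by (b - a).toNat
decreasing_by omega

set_option maxHeartbeats 4000000 in
lemma pvMain (lines : List String) :
    ∀ (ls : List String) (k : Nat) (b m : Bool) (c c' : Int) (p : Option Int),
      ls = lines.drop k → pvInv lines k c m c' p →
      (let st := (PySem.List.enumerate ls (k : Int)).foldl (pvStepA lines) (b, c, m)
       if st.2.2 then st.2.1 + 1 else st.2.1)
      = ((PySem.List.enumerate ls (k : Int)).foldl pvStepB (b, c', p)).2.1 := by
  intro ls
  induction ls with
  | nil =>
    intro k b m c c' p hdrop hinv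
    simp only [PySem.List.enumerate_nil, List.foldl_nil]
    match p with
    | none =>
      simp only [pvInv] at hinv
      rw [hinv]
      by_cases hm : m <;> simp [hm]
    | some t =>
      obtain ⟨htk, hc, hm, hemp⟩ := hinv
      have hk : lines.length ≤ k := by
        by_contra h
        push_neg at h
        have := List.drop_eq_nil_iff.mp hdrop.symm
        omega
      have hm0 : m = false := by
        rw [hm, pvL]
        apply pvLookA_all_empty
        intro j hj
        rw [PySem.List.mem_pyRange_one] at hj
        have h2 : j < (k : Int) := by
          have : j < (lines.length : Int) := by
            have := hj.2
            omega
          omega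
        exact hemp j (by omega) h2
      rw [hm0, hc]
      rfl
  | cons x ls ih =>
    intro k b m c c' p hdrop hinv
    have hklen : k < lines.length := by
      by_contra h
      push_neg at h
      rw [List.drop_eq_nil_iff.mpr h] at hdrop
      exact List.cons_ne_nil _ _ hdrop
    have hx : PySem.List.pyGetD lines (k : Int) "" = x := by
      rw [PySem.List.pyGetD_natCast]
      have hx? : lines[k]? = some x := by
        have := congrArg (·[0]?) hdrop
        simpa using this.symm
      simp [List.getD, hx?]
    have hdrop' : ls = lines.drop (k + 1) := by
      have : (lines.drop k).tail = lines.drop (k + 1) := by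
        rw [← List.drop_drop]
        simp
      rw [← this, ← hdrop]
      rfl
    simp only [PySem.List.enumerate_cons, List.foldl_cons]
    have hcast : (k : Int) + 1 = ((k + 1 : Nat) : Int) := by push_cast; ring
    rw [hcast]
    by_cases hE : PySem.Str.strip x = ""
    · -- blank line: both states unchanged (B keeps any pending trigger)
      have hC1 : ¬ PySem.Str.strip x = "-" := by rw [hE]; decide
      have hC3 : PySem.Str.startswith (PySem.Str.strip x) "#" = true ∨ PySem.Str.strip x = "" :=
        Or.inr hE
      have hA : pvStepA lines (b, c, m) ((k : Int), x) = (b, c, m) := by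
        simp only [pvStepA]; rw [if_neg hC1]
        by_cases hb : b
        · rw [if_neg (show ¬ b = false by simp [hb]), if_pos hC3]
        · rw [if_pos (show b = false by simp [hb])]
      have hB : pvStepB (b, c', p) ((k : Int), x) = (b, c', p) := by
        match p with
        | none =>
          simp only [pvStepB]; rw [if_neg hC1]
          by_cases hb : b
          · rw [if_neg (show ¬ b = false by simp [hb]), if_pos hC3]
          · rw [if_pos (show b = false by simp [hb])]
        | some t =>
          simp only [pvStepB]; rw [if_neg (not_not_intro hE), if_neg hC1]
          by_cases hb : b
          · rw [if_neg (show ¬ b = false by simp [hb]), if_pos hC3]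
          · rw [if_pos (show b = false by simp [hb])]
      rw [hA, hB]
      refine ih (k + 1) b m c c' p hdrop' ?_
      match p with
      | none => exact hinv
      | some t =>
        obtain ⟨htk, hc, hm, hemp⟩ := hinv
        refine ⟨by push_cast; omega, hc, hm, ?_⟩
        intro j hj1 hj2
        push_cast at hj2
        by_cases hjk : j = (k : Int)
        · rw [hjk, hx]; exact hE
        · exact hemp j hj1 (by omega)
    · -- non-blank line: B resolves any pending trigger
      have hres : ∀ t : Int, t < (k : Int) →
          (∀ j : Int, t < j → j < (k : Int) → PySem.Str.strip (PySem.List.pyGetD lines j "") = "") →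
          pvL lines t = (if (k : Int) - t < 10 then
              (PySem.Str.startswith x " " || PySem.Str.startswith x "\t") else false) := by
        intro t htk hemp
        rw [pvL, pvLookA_first_nonempty lines (k : Int) (by rw [hx]; exact hE) (t + 1)
              (min (t + 10) (lines.length : Int)) (by omega)
              (fun j hj1 hj2 => hemp j (by omega) hj2), hx]
        have hiff : ((k : Int) < min (t + 10) (lines.length : Int)) ↔ ((k : Int) - t < 10) := by
          rw [lt_min_iff]
          constructor
          · intro h; omega
          · intro h
            exact ⟨by omega, by exact_mod_cast hklen⟩
        by_cases h10 : (k : Int) - t < 10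
        · rw [if_pos (hiff.mpr h10), if_pos h10]
        · rw [if_neg (fun h => h10 (hiff.mp h)), if_neg h10]
      cases p with
      | none =>
        simp only [pvInv] at hinv
        have hBr : ∀ b0 : Bool, ∀ pn : Option Int,
            pvStepB (b0, c', none) ((k : Int), x) =
            (if PySem.Str.strip x = "-" then (true, c', none)
             else if b0 = false then (b0, c', none)
             else if PySem.Str.startswith (PySem.Str.strip x) "#" = true ∨ PySem.Str.strip x = "" then (b0, c', none)
             else if ¬ (PySem.Str.startswith x " " = true ∨ PySem.Str.startswith x "\t" = true) then (b0, c', some (k : Int))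
             else (b0, c', none)) := by
          intro b0 pn
          simp only [pvStepB]
        by_cases hC1 : PySem.Str.strip x = "-"
        · rw [show pvStepA lines (b, c, m) ((k : Int), x) = (true, c, m) by
             simp only [pvStepA]; rw [if_pos hC1]]
          rw [hBr b none, if_pos hC1]
          exact ih (k + 1) true m c c' none hdrop' hinv
        · by_cases hb : b
          · have hbne : ¬ b = false := by simp [hb]
            by_cases hC3 : PySem.Str.startswith (PySem.Str.strip x) "#" = true
            · have hc3 : PySem.Str.startswith (PySem.Str.strip x) "#" = true ∨ PySem.Str.strip x = "" := Or.inl hC3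
              rw [show pvStepA lines (b, c, m) ((k : Int), x) = (b, c, m) by
                 simp only [pvStepA]; rw [if_neg hC1, if_neg hbne, if_pos hc3]]
              rw [hBr b none, if_neg hC1, if_neg hbne, if_pos hc3]
              exact ih (k + 1) b m c c' none hdrop' hinv
            · have hc3 : ¬ (PySem.Str.startswith (PySem.Str.strip x) "#" = true ∨ PySem.Str.strip x = "") := by
                rintro (h | h)
                · exact hC3 h
                · exact hE h
              by_cases hInd : PySem.Str.startswith x " " = true ∨ PySem.Str.startswith x "\t" = true
              · -- indented body line: both unchanged
                rw [show pvStepA lines (b, c, m) ((k : Int), x) = (b, c, m) by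
                   simp only [pvStepA]; rw [if_neg hC1, if_neg hbne, if_neg hc3, if_neg (not_not_intro hInd)]]
                rw [hBr b none, if_neg hC1, if_neg hbne, if_neg hc3, if_neg (not_not_intro hInd)]
                exact ih (k + 1) b m c c' none hdrop' hinv
              · -- trigger line
                rw [show pvStepA lines (b, c, m) ((k : Int), x) =
                      (b, (if m then c + 1 else c), pvL lines (k : Int)) by
                   simp only [pvStepA]; rw [if_neg hC1, if_neg hbne, if_neg hc3, if_pos hInd]
                   rfl]
                rw [hBr b none, if_neg hC1, if_neg hbne, if_neg hc3, if_pos hInd]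
                apply ih (k + 1) b (pvL lines (k : Int)) (if m then c + 1 else c) c'
                  (some (k : Int)) hdrop'
                refine ⟨by push_cast; omega, by rw [hinv]; by_cases hm : m <;> simp [hm],
                  rfl, ?_⟩
                intro j hj1 hj2
                push_cast at hj2
                omega
          · have hbe : b = false := by simpa using hb
            rw [show pvStepA lines (b, c, m) ((k : Int), x) = (b, c, m) by
               simp only [pvStepA]; rw [if_neg hC1, if_pos hbe]]
            rw [hBr b none, if_neg hC1, if_pos hbe]
            exact ih (k + 1) b m c c' none hdrop' hinv
      | some t =>
        obtain ⟨htk, hc, hm, hemp⟩ := hinv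
        have hm' : m = (if (k : Int) - t < 10 then
            (PySem.Str.startswith x " " || PySem.Str.startswith x "\t") else false) := by
          rw [hm]; exact hres t htk hemp
        have hcnew : (if (k : Int) - t < 10 ∧
              (PySem.Str.startswith x " " = true ∨ PySem.Str.startswith x "\t" = true)
            then c' + 1 else c') = c + (if m then 1 else 0) := by
          by_cases h10 : (k : Int) - t < 10
          · by_cases hInd : PySem.Str.startswith x " " = true ∨ PySem.Str.startswith x "\t" = true
            · have hmt : m = true := by
                rw [hm', if_pos h10]
                exact Bool.or_eq_true_iff.mpr hInd
              rw [if_pos ⟨h10, hInd⟩, hmt, hc]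
              simp
            · have hmf : m = false := by
                rw [hm', if_pos h10]
                exact Bool.or_eq_false_iff.mpr ⟨Bool.eq_false_iff.mpr (fun h => hInd (Or.inl h)), Bool.eq_false_iff.mpr (fun h => hInd (Or.inr h))⟩
              rw [if_neg (by tauto), hmf, hc]
              simp
          · have hmf : m = false := by rw [hm', if_neg h10]
            rw [if_neg (by tauto), hmf, hc]
            simp
        have hBr : pvStepB (b, c', some t) ((k : Int), x) =
            (if PySem.Str.strip x = "-" then (true, c + (if m then 1 else 0), none)
             else if b = false then (b, c + (if m then 1 else 0), none)
             else if PySem.Str.startswith (PySem.Str.strip x) "#" = true ∨ PySem.Str.strip x = "" then (b, c + (if m then 1 else 0), none)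
             else if ¬ (PySem.Str.startswith x " " = true ∨ PySem.Str.startswith x "\t" = true) then (b, c + (if m then 1 else 0), some (k : Int))
             else (b, c + (if m then 1 else 0), none)) := by
          simp only [pvStepB]
          simp only [if_pos (show ¬ PySem.Str.strip x = "" from hE)]
          rw [hcnew]
        by_cases hC1 : PySem.Str.strip x = "-"
        · rw [show pvStepA lines (b, c, m) ((k : Int), x) = (true, c, m) by
             simp only [pvStepA]; rw [if_pos hC1]]
          rw [hBr, if_pos hC1]
          exact ih (k + 1) true m c (c + (if m then 1 else 0)) none hdrop' rfl
        · by_cases hb : b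
          · have hbne : ¬ b = false := by simp [hb]
            by_cases hC3 : PySem.Str.startswith (PySem.Str.strip x) "#" = true
            · have hc3 : PySem.Str.startswith (PySem.Str.strip x) "#" = true ∨ PySem.Str.strip x = "" := Or.inl hC3
              rw [show pvStepA lines (b, c, m) ((k : Int), x) = (b, c, m) by
                 simp only [pvStepA]; rw [if_neg hC1, if_neg hbne, if_pos hc3]]
              rw [hBr, if_neg hC1, if_neg hbne, if_pos hc3]
              exact ih (k + 1) b m c (c + (if m then 1 else 0)) none hdrop' rfl
            · have hc3 : ¬ (PySem.Str.startswith (PySem.Str.strip x) "#" = true ∨ PySem.Str.strip x = "") := by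
                rintro (h | h)
                · exact hC3 h
                · exact hE h
              by_cases hInd : PySem.Str.startswith x " " = true ∨ PySem.Str.startswith x "\t" = true
              · rw [show pvStepA lines (b, c, m) ((k : Int), x) = (b, c, m) by
                   simp only [pvStepA]; rw [if_neg hC1, if_neg hbne, if_neg hc3, if_neg (not_not_intro hInd)]]
                rw [hBr, if_neg hC1, if_neg hbne, if_neg hc3, if_neg (not_not_intro hInd)]
                exact ih (k + 1) b m c (c + (if m then 1 else 0)) none hdrop' rfl
              · -- trigger line: the pending trigger resolves without counting (not indented),
                -- and A's stored flag for it is false for the same reason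
                have hmf : m = false := by
                  rw [hm']
                  by_cases h10 : (k : Int) - t < 10
                  · rw [if_pos h10]
                    exact Bool.or_eq_false_iff.mpr ⟨Bool.eq_false_iff.mpr (fun h => hInd (Or.inl h)), Bool.eq_false_iff.mpr (fun h => hInd (Or.inr h))⟩
                  · rw [if_neg h10]
                rw [show pvStepA lines (b, c, m) ((k : Int), x) =
                      (b, c, pvL lines (k : Int)) by
                   simp only [pvStepA]; rw [if_neg hC1, if_neg hbne, if_neg hc3, if_pos hInd, hmf]
                   rfl]
                rw [hBr, if_neg hC1, if_neg hbne, if_neg hc3, if_pos hInd]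
                apply ih (k + 1) b (pvL lines (k : Int)) c (c + (if m then 1 else 0))
                  (some (k : Int)) hdrop'
                refine ⟨by push_cast; omega, by rw [hmf]; simp, rfl, ?_⟩
                intro j hj1 hj2
                push_cast at hj2
                omega
          · have hbe : b = false := by simpa using hb
            rw [show pvStepA lines (b, c, m) ((k : Int), x) = (b, c, m) by
               simp only [pvStepA]; rw [if_neg hC1, if_pos hbe]]
            rw [hBr, if_neg hC1, if_pos hbe]
            exact ih (k + 1) b m c (c + (if m then 1 else 0)) none hdrop' rfl

-- ===== VERDICT (by name: the statement is the Claim_ definition above) =====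
theorem count_multistep_commands_py_spec : Claim_equal_count_multistep_commands_py := by
  intro talon_text _
  unfold Spec_count_multistep_commands_py count_multistep_commands_py count_multistep_commands_py_alt
  have h := pvMain (PySem.Str.splitlines talon_text) (PySem.Str.splitlines talon_text) 0
    false false 0 0 none rfl (by simp [pvInv])
  simpa using h
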